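-- pv_equiv track=rewrite | github.com/RiddhiBagkar/DatastructureProblem | equalOcurrenceOf-Character.py | areOccurrencesEqual
-- ===== SOURCE A (Python) =====
-- def areOccurrencesEqual(s):
--     occur_count={}
--     for i in range(len(s)):
--         if s[i] not in occur_count:
--             occur_count[s[i]]=1
--
--         else:
--             occur_count[s[i]]+=1
--
--     all_values_same=len(set(occur_count.values())) ==1
--
--     return all_values_same
-- ===== SOURCE B (Python) =====
-- def areOccurrencesEqual(s):
--     if not s:
--         return False
--     first = s.count(s[0])
--     return all(s.count(c) == first for c in s)
-- ===== Notes on version B (the rewrite author's own statement) =====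
-- stated objective: simpler
-- what changed: Replaces the index-loop dict counting plus set-of-values test with a dict-free check that every character's str.count equals the first character's count (empty string short-circuits to False).
import Mathlib
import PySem

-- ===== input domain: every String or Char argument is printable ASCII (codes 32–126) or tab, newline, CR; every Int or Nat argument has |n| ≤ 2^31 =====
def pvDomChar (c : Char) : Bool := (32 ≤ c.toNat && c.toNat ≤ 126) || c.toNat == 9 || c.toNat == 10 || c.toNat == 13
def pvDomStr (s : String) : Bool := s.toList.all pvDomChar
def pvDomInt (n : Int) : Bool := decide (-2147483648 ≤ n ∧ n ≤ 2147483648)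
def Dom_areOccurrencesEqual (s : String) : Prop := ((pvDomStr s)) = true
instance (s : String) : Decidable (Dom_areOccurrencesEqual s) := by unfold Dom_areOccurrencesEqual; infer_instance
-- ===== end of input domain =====

-- B replaces the dict-of-counts + set-of-values test by comparing each character's count with the first character's count (simpler, no dict); return values agree on all inputs.

-- ===== PORT A =====
def areOccurrencesEqual (s : String) : Bool :=
  let cs := s.toList
  -- for i in range(len(s)): if s[i] not in occur_count: occur_count[s[i]]=1 else: occur_count[s[i]]+=1
  let occur_count : PySem.Dict Char Int :=
    (PySem.List.pyRange 0 (cs.length : Int) 1).foldl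
      (fun d i =>
        if d.contains (PySem.List.pyGetD cs i ' ') = false then
          d.insert (PySem.List.pyGetD cs i ' ') 1
        else
          d.insert (PySem.List.pyGetD cs i ' ') (d.getD (PySem.List.pyGetD cs i ' ') 0 + 1))
      PySem.Dict.empty
  -- len(set(occur_count.values())) == 1
  (PySem.Set.ofList occur_count.values).length == 1

-- ===== PORT B =====
def areOccurrencesEqual_alt (s : String) : Bool :=
  match s.toList with
  | [] => false
  | c0 :: _ =>
    let cs := s.toList
    let first := cs.count c0
    cs.all (fun c => cs.count c == first)

-- ===== PRECONDITION & SPEC =====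
def Spec_areOccurrencesEqual (s : String) (out : Bool) : Prop := out = areOccurrencesEqual_alt s
instance (s : String) (out : Bool) : Decidable (Spec_areOccurrencesEqual s out) := by unfold Spec_areOccurrencesEqual; infer_instance

-- ===== CLAIM (what is proved, stated in full; the proofs are below) =====
def Claim_equal_areOccurrencesEqual : Prop := ∀ (s : String), Dom_areOccurrencesEqual s → Spec_areOccurrencesEqual s (areOccurrencesEqual s)

-- ===== LEMMAS AND PROOFS =====

-- a Nodup list whose members all equal a member is that singleton
theorem pv_nodup_all_eq {α : Type} (l : List α) (a : α) (ha : a ∈ l) (hn : l.Nodup)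
    (h : ∀ y ∈ l, y = a) : l = [a] := by
  match l, ha with
  | b :: t, _ =>
    have hb : b = a := h b (List.mem_cons_self ..)
    cases t with
    | nil => simp [hb]
    | cons c t' =>
      exfalso
      have hc : c = a := h c (by simp)
      have := (List.pairwise_cons.mp hn).1 c (by simp)
      exact this (hb.trans hc.symm)

-- A's loop step is the running-count insert step on every dict
theorem pv_stepA_eq (d : PySem.Dict Char Int) (c : Char) :
    (if d.contains c = false then d.insert c 1 else d.insert c (d.getD c 0 + 1))
      = d.insert c (d.getD c 0 + 1) := by
  by_cases h : d.contains c = false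
  · rw [if_pos h, PySem.Dict.getD_of_not_contains d 0 h]; norm_num
  · rw [if_neg h]

-- A's port with the index loop replaced by the equivalent fold over the characters
theorem pv_bridge (s : String) :
    areOccurrencesEqual s
      = ((PySem.Set.ofList ((s.toList.foldl
            (fun (d : PySem.Dict Char Int) (c : Char) =>
              if d.contains c = false then d.insert c 1
              else d.insert c (d.getD c 0 + 1)) PySem.Dict.empty).values)).length == 1) := by
  unfold areOccurrencesEqual
  exact congrArg (fun t => (PySem.Set.ofList (PySem.Dict.values t)).length == 1)
    (PySem.List.foldl_pyRange_zero_pyGetD' s.toList ' '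
      (fun (d : PySem.Dict Char Int) (c : Char) =>
        if d.contains c = false then d.insert c 1
        else d.insert c (d.getD c 0 + 1)) PySem.Dict.empty)

-- the core fact on character lists: A's value equals B's value
theorem pv_main (cs : List Char) :
    ((PySem.Set.ofList ((cs.foldl
        (fun (d : PySem.Dict Char Int) (c : Char) =>
          if d.contains c = false then d.insert c 1
          else d.insert c (d.getD c 0 + 1)) PySem.Dict.empty).values)).length == 1)
    = (match cs with
       | [] => false
       | c0 :: _ => cs.all (fun c => cs.count c == cs.count c0)) := by
  simp only [pv_stepA_eq]
  rw [PySem.Dict.foldl_insert_getD_add_one_eq_counter]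
  have hvals : (PySem.Dict.counter cs).values
      = (PySem.Set.ofList cs).map (fun k => ((cs.count k : Int))) := by
    simp [PySem.Dict.values, PySem.Dict.items_counter, List.map_map]
  rw [hvals]
  cases cs with
  | nil => decide
  | cons c0 rest =>
    apply Bool.eq_iff_iff.mpr
    simp only [beq_iff_eq, List.all_eq_true]
    set cs := c0 :: rest with hcs
    set V := (PySem.Set.ofList cs).map (fun k => ((cs.count k : Int))) with hV
    have hmemV : ∀ c ∈ cs, ((cs.count c : Int)) ∈ PySem.Set.ofList V := by
      intro c hc
      exact (PySem.Set.mem_ofList V _).mpr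
        (List.mem_map_of_mem ((PySem.Set.mem_ofList cs c).mpr hc))
    constructor
    · intro h1 c hc
      obtain ⟨a, ha⟩ := List.length_eq_one_iff.mp h1
      have h0 : ((cs.count c0 : Int)) = a := by
        have := hmemV c0 (by simp [hcs]); rw [ha] at this; simpa using this
      have h2 : ((cs.count c : Int)) = a := by
        have := hmemV c hc; rw [ha] at this; simpa using this
      have : ((cs.count c : Int)) = ((cs.count c0 : Int)) := by rw [h0, h2]
      exact_mod_cast this
    · intro h
      have hall : ∀ y ∈ PySem.Set.ofList V, y = ((cs.count c0 : Int)) := by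
        intro y hy
        have hy' : y ∈ V := (PySem.Set.mem_ofList V y).mp hy
        obtain ⟨k, hk, rfl⟩ := List.mem_map.mp hy'
        have hkcs : k ∈ cs := (PySem.Set.mem_ofList cs k).mp hk
        exact_mod_cast h k hkcs
      have := pv_nodup_all_eq (PySem.Set.ofList V) ((cs.count c0 : Int))
        (hmemV c0 (by simp [hcs])) (PySem.Set.nodup_ofList V) hall
      rw [this]; rfl

-- ===== VERDICT (by name: the statement is the Claim_ definition above) =====
theorem areOccurrencesEqual_spec : Claim_equal_areOccurrencesEqual := by
  intro s _
  unfold Spec_areOccurrencesEqual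
  rw [pv_bridge]
  exact pv_main s.toList
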